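-- pv_equiv track=rewrite | github.com/AmirArama/MusicProj | circle_of_fifths_modes_map.py | generate_major_scale
-- ===== SOURCE A (Python) =====
-- def generate_major_scale(key, use_flats=True):
--     """Generate the major scale for a given key, consistent with the circle of fifths."""
--     # Chromatic scales with sharps and flats
--     chromatic_sharps = ["C", "C#", "D", "D#", "E", "F", "F#", "G", "G#", "A", "A#", "B"]
--     chromatic_flats = ["C", "Db", "D", "Eb", "E", "F", "Gb", "G", "Ab", "A", "Bb", "B"]
--
--     # Use flats or sharps based on the key
--     chromatic = chromatic_flats if use_flats else chromatic_sharps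
--
--     major_intervals = [2, 2, 1, 2, 2, 2, 1]  # W-W-H-W-W-W-H (whole and half steps)
--
--     # Find starting position of the key
--     start_idx = chromatic.index(key)
--     major_scale = [key]
--
--     # Build the major scale using intervals
--     for step in major_intervals:
--         start_idx = (start_idx + step) % len(chromatic)
--         major_scale.append(chromatic[start_idx])
--
--     return major_scale
-- ===== SOURCE B (Python) =====
-- def generate_major_scale(key, use_flats=True):
--     """Generate the major scale for a given key, consistent with the circle of fifths."""
--     chromatic_sharps = ["C", "C#", "D", "D#", "E", "F", "F#", "G", "G#", "A", "A#", "B"]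
--     chromatic_flats = ["C", "Db", "D", "Eb", "E", "F", "Gb", "G", "Ab", "A", "Bb", "B"]
--     chromatic = chromatic_flats if use_flats else chromatic_sharps
--     degrees = [0, 2, 4, 5, 7, 9, 11, 12]  # cumulative semitone offsets of the major scale
--     start_idx = chromatic.index(key)
--     return [chromatic[(start_idx + d) % len(chromatic)] for d in degrees]
-- ===== Notes on version B (the rewrite author's own statement) =====
-- stated objective: idiomatic
-- what changed: Replaces the running-accumulator interval loop (mutable start_idx updated per step, list appended) with a static cumulative-offset table [0,2,4,5,7,9,11,12] and one direct-indexing comprehension.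
import Mathlib
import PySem

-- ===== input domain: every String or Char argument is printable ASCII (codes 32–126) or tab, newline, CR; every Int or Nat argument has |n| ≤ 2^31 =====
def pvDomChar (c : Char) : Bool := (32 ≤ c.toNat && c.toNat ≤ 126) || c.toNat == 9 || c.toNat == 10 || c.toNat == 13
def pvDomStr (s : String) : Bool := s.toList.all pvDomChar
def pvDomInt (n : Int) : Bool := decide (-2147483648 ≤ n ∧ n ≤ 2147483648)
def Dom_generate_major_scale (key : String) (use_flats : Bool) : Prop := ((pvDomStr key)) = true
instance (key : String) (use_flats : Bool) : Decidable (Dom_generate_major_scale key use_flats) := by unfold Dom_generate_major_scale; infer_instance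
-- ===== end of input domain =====

-- B replaces A's running-accumulator interval loop with a static cumulative-offset
-- table indexed in one pass (idiomatic decomposition; same cost).


-- ===== PORT A =====
def pvChromaticSharps : List String := ["C", "C#", "D", "D#", "E", "F", "F#", "G", "G#", "A", "A#", "B"]
def pvChromaticFlats : List String := ["C", "Db", "D", "Eb", "E", "F", "Gb", "G", "Ab", "A", "Bb", "B"]

-- literal port of A: find start index, then fold the interval list, maintaining
-- (start_idx, major_scale) as A's loop does; index? = none is the ValueError case,
-- excluded by Pre_ (the port returns [] there).
def generate_major_scale (key : String) (use_flats : Bool) : List String :=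
  let chromatic := if use_flats then pvChromaticFlats else pvChromaticSharps
  let major_intervals : List Nat := [2, 2, 1, 2, 2, 2, 1]
  match PySem.List.index? chromatic key with
  | none => []
  | some start_idx =>
    let st := major_intervals.foldl
      (fun (st : Nat × List String) step =>
        let idx := (st.1 + step) % chromatic.length
        (idx, st.2 ++ [chromatic.getD idx ""]))
      (start_idx, [key])
    st.2

-- ===== PORT B =====
def generate_major_scale_alt (key : String) (use_flats : Bool) : List String :=
  let chromatic := if use_flats then pvChromaticFlats else pvChromaticSharps
  let degrees : List Nat := [0, 2, 4, 5, 7, 9, 11, 12]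
  match PySem.List.index? chromatic key with
  | none => []
  | some start_idx =>
    degrees.map (fun d => chromatic.getD ((start_idx + d) % chromatic.length) "")

-- ===== PRECONDITION & SPEC =====
-- Pre_ excludes exactly the keys not in the chosen chromatic scale, on which A's
-- chromatic.index(key) raises ValueError (B's does too).
def Pre_generate_major_scale (key : String) (use_flats : Bool) : Prop :=
  key ∈ (if use_flats then pvChromaticFlats else pvChromaticSharps)
instance (key : String) (use_flats : Bool) : Decidable (Pre_generate_major_scale key use_flats) := by unfold Pre_generate_major_scale; infer_instance
def pvWitness_generate_major_scale : String × Bool := ("C", true)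

def Spec_generate_major_scale (key : String) (use_flats : Bool) (out : List String) : Prop := out = generate_major_scale_alt key use_flats
instance (key : String) (use_flats : Bool) (out : List String) : Decidable (Spec_generate_major_scale key use_flats out) := by unfold Spec_generate_major_scale; infer_instance

-- ===== CLAIM (what is proved, stated in full; the proofs are below) =====
def Claim_equal_generate_major_scale : Prop := ∀ (key : String) (use_flats : Bool), Dom_generate_major_scale key use_flats → Pre_generate_major_scale key use_flats → Spec_generate_major_scale key use_flats (generate_major_scale key use_flats)

-- ===== LEMMAS AND PROOFS =====

-- ===== VERDICT (by name: the statement is the Claim_ definition above) =====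
theorem generate_major_scale_spec : Claim_equal_generate_major_scale := by
  intro key use_flats _ hpre
  unfold Pre_generate_major_scale at hpre
  unfold Spec_generate_major_scale
  cases use_flats <;> simp only [if_true, if_false, Bool.false_eq_true] at hpre <;>
    fin_cases hpre <;> decide
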